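-- pv_equiv track=rewrite | github.com/grapheneaffiliate/h4-polytopic-attention | solve_arc1_recovery.py | solve_dc1df850
-- ===== SOURCE A (Python) =====
-- def solve_dc1df850(grid):
--     """2 gets surrounded by 1s (3x3 ring)."""
--     rows, cols = len(grid), len(grid[0])
--     out = [row[:] for row in grid]
--     for r in range(rows):
--         for c in range(cols):
--             if grid[r][c] == 2:
--                 for dr in range(-1, 2):
--                     for dc in range(-1, 2):
--                         nr, nc = r+dr, c+dc
--                         if 0 <= nr < rows and 0 <= nc < cols and grid[nr][nc] == 0:
--                             out[nr][nc] = 1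
--     return out
-- ===== SOURCE B (Python) =====
-- def solve_dc1df850(grid):
--     """2 gets surrounded by 1s (3x3 ring): each 0-cell pulls from its own clamped 3x3 window."""
--     rows, cols = len(grid), len(grid[0])
--
--     def near2(r, c):
--         return any(grid[nr][nc] == 2
--                    for nr in range(max(r - 1, 0), min(r + 2, rows))
--                    for nc in range(max(c - 1, 0), min(c + 2, cols)))
--
--     out = []
--     for r, row in enumerate(grid):
--         new_row = row[:]
--         for c in range(cols):
--             if row[c] == 0 and near2(r, c):
--                 new_row[c] = 1
--         out.append(new_row)
--     return out
-- ===== Notes on version B (the rewrite author's own statement) =====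
-- stated objective: alternative
-- what changed: A pushes: for every cell equal to 2 it writes 1 into each in-bounds 0-cell of its 3x3 neighborhood in a mutable copy; B pulls: it builds each output row from a fresh copy, each 0-cell deciding its own value by scanning its clamped 3x3 window for a 2. Pre_ excludes only the inputs on which A raises IndexError (empty grid, or a row shorter than row 0).
import Mathlib
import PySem

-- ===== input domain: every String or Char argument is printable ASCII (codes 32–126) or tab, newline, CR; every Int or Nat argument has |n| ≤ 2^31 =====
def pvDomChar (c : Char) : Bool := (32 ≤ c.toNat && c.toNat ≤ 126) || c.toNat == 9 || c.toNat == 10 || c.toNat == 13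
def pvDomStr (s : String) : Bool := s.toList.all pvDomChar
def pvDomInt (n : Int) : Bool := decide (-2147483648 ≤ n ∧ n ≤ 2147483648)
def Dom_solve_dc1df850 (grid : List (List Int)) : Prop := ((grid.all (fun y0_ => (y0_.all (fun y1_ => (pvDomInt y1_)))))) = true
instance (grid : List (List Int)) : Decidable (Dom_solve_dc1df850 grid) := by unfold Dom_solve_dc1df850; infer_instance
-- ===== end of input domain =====

-- B replaces A's push-style writer (each 2 stamps 1s into a mutable copy) by a pull-style
-- comprehension (each 0-cell inspects its own clamped 3x3 window); objective: alternative decomposition.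

-- grid[r][c] for indices the loops keep non-negative and in range (Pre_ guarantees the rows are
-- long enough); the .getD defaults are never reached on inputs satisfying Pre_.
def pvCell (grid : List (List Int)) (r c : Int) : Int :=
  (PySem.List.pyGet? ((PySem.List.pyGet? grid r).getD []) c).getD 0

-- out[r][c] = v for the guarded (0 ≤ r < rows, 0 ≤ c < cols) indices of A's write
def pvSet (out : List (List Int)) (r c : Int) (v : Int) : List (List Int) :=
  out.modify r.toNat (fun row => row.set c.toNat v)

-- ===== PORT A =====
def solve_dc1df850 (grid : List (List Int)) : List (List Int) :=
  let rows : Int := grid.length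
  let cols : Int := ((PySem.List.pyGet? grid 0).getD []).length
  let out := grid.map (fun row => row)    -- [row[:] for row in grid]
  (PySem.List.pyRange 0 rows 1).foldl (fun out r =>
    (PySem.List.pyRange 0 cols 1).foldl (fun out c =>
      if pvCell grid r c = 2 then
        (PySem.List.pyRange (-1) 2 1).foldl (fun out dr =>
          (PySem.List.pyRange (-1) 2 1).foldl (fun out dc =>
            let nr := r + dr
            let nc := c + dc
            if 0 ≤ nr ∧ nr < rows ∧ 0 ≤ nc ∧ nc < cols ∧ pvCell grid nr nc = 0 then
              pvSet out nr nc 1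
            else out) out) out
      else out) out) out

-- ===== PORT B =====
def solve_dc1df850_alt (grid : List (List Int)) : List (List Int) :=
  let rows : Int := grid.length
  let cols : Int := ((PySem.List.pyGet? grid 0).getD []).length
  let near2 : Int → Int → Bool := fun r c =>
    (PySem.List.pyRange (max (r - 1) 0) (min (r + 2) rows) 1).any (fun nr =>
      (PySem.List.pyRange (max (c - 1) 0) (min (c + 2) cols) 1).any (fun nc =>
        pvCell grid nr nc == 2))
  -- out = []; for r, row in enumerate(grid): new_row = row[:]; for c in range(cols): …
  (PySem.List.enumerate grid 0).map (fun rrow =>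
    (PySem.List.pyRange 0 cols 1).foldl (fun nrow c =>
      if ((PySem.List.pyGet? rrow.2 c).getD 0 == 0) && near2 rrow.1 c then
        nrow.set c.toNat 1
      else nrow) rrow.2)

-- ===== PRECONDITION & SPEC =====
-- Pre_ excludes exactly the inputs on which Python A raises (IndexError): the empty grid
-- (len(grid[0])) and grids with a row shorter than row 0 (reading grid[r][c] for c < cols).
def Pre_solve_dc1df850 (grid : List (List Int)) : Prop :=
  grid ≠ [] ∧ ∀ row ∈ grid, (grid.headD []).length ≤ row.length
instance (grid : List (List Int)) : Decidable (Pre_solve_dc1df850 grid) := by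
  unfold Pre_solve_dc1df850; infer_instance
def pvWitness_solve_dc1df850 : List (List Int) := [[0, 2, 0], [0, 0, 3]]

def Spec_solve_dc1df850 (grid : List (List Int)) (out : List (List Int)) : Prop := out = solve_dc1df850_alt grid
instance (grid : List (List Int)) (out : List (List Int)) : Decidable (Spec_solve_dc1df850 grid out) := by unfold Spec_solve_dc1df850; infer_instance

-- ===== CLAIM (what is proved, stated in full; the proofs are below) =====
def Claim_equal_solve_dc1df850 : Prop := ∀ (grid : List (List Int)), Dom_solve_dc1df850 grid → Pre_solve_dc1df850 grid → Spec_solve_dc1df850 grid (solve_dc1df850 grid)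

-- ===== LEMMAS AND PROOFS =====

-- the write targets A's nested loops produce, flattened; a quad carries (r, c, dr, dc)
def pvQuads (grid : List (List Int)) (rows cols : Int) : List (Int × Int × Int × Int) :=
  (PySem.List.pyRange 0 rows 1).flatMap (fun r =>
    (PySem.List.pyRange 0 cols 1).flatMap (fun c =>
      if pvCell grid r c = 2 then
        (PySem.List.pyRange (-1) 2 1).flatMap (fun dr =>
          (PySem.List.pyRange (-1) 2 1).map (fun dc => (r, c, dr, dc)))
      else []))

-- the single write a quad performs (if its guard holds)
def pvTgt (grid : List (List Int)) (rows cols : Int) (q : Int × Int × Int × Int) : Option (Int × Int) :=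
  if 0 ≤ q.1 + q.2.2.1 ∧ q.1 + q.2.2.1 < rows ∧ 0 ≤ q.2.1 + q.2.2.2 ∧ q.2.1 + q.2.2.2 < cols ∧
      pvCell grid (q.1 + q.2.2.1) (q.2.1 + q.2.2.2) = 0 then
    some (q.1 + q.2.2.1, q.2.1 + q.2.2.2)
  else none

def pvStep (grid : List (List Int)) (rows cols : Int) (out : List (List Int))
    (q : Int × Int × Int × Int) : List (List Int) :=
  match pvTgt grid rows cols q with
  | some p => pvSet out p.1 p.2 1
  | none => out

-- cell read with Nat indices (out-of-range = 0), the proof-side view of pvCell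
def cellN (grid : List (List Int)) (i j : Nat) : Int := (grid.getD i []).getD j 0

theorem pvCell_natCast (grid : List (List Int)) (i j : Nat) :
    pvCell grid (i : Int) (j : Int) = cellN grid i j := by
  simp [pvCell, cellN, PySem.List.pyGet?_natCast, List.getD_eq_getElem?_getD]

theorem cellN_eq (l : List (List Int)) (i j : Nat) (hi : i < l.length) (hj : j < l[i].length) :
    cellN l i j = l[i][j] := by
  simp [cellN, List.getD_eq_getElem?_getD, hi, hj]

theorem rowlen_pvSet (out : List (List Int)) (r c : Int) (v : Int) (i : Nat) :
    ((pvSet out r c v).getD i []).length = (out.getD i []).length := by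
  simp only [pvSet, List.getD_eq_getElem?_getD, List.getElem?_modify]
  cases h : out[i]? <;> simp
  split <;> simp

theorem cellN_pvSet (out : List (List Int)) (r c : Int) (v : Int) (hr : 0 ≤ r) (hc : 0 ≤ c)
    (i j : Nat) (hi : i < out.length) (hj : j < (out.getD i []).length) :
    cellN (pvSet out r c v) i j = if r = (i : Int) ∧ c = (j : Int) then v else cellN out i j := by
  have hget : out[i]? = some out[i] := List.getElem?_eq_getElem hi
  have hj' : j < out[i].length := by
    simpa [List.getD_eq_getElem?_getD, hget] using hj
  simp only [pvSet, cellN, List.getD_eq_getElem?_getD, List.getElem?_modify, hget]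
  by_cases h1 : r.toNat = i
  · simp only [h1]
    by_cases h2 : c.toNat = j
    · have : r = (i : Int) ∧ c = (j : Int) := by omega
      simp [hj', this]
    · have : ¬ (r = (i : Int) ∧ c = (j : Int)) := by omega
      simp [h2, this]
  · have : ¬ (r = (i : Int) ∧ c = (j : Int)) := by omega
    simp [h1, this]

theorem pvTgt_nonneg (grid : List (List Int)) (rows cols : Int) (q : Int × Int × Int × Int)
    (p : Int × Int) (h : pvTgt grid rows cols q = some p) : 0 ≤ p.1 ∧ 0 ≤ p.2 := by
  unfold pvTgt at h
  split at h
  · rename_i hc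
    cases h
    exact ⟨hc.1, hc.2.2.1⟩
  · exact absurd h (by simp)

theorem length_foldl_writes (grid : List (List Int)) (rows cols : Int)
    (L : List (Int × Int × Int × Int)) (init : List (List Int)) :
    (L.foldl (pvStep grid rows cols) init).length = init.length := by
  induction L generalizing init with
  | nil => rfl
  | cons q L ih =>
    rw [List.foldl_cons, ih]
    unfold pvStep
    cases h : pvTgt grid rows cols q <;> simp [pvSet]

theorem rowlen_foldl_writes (grid : List (List Int)) (rows cols : Int)
    (L : List (Int × Int × Int × Int)) (init : List (List Int)) (i : Nat) :
    ((L.foldl (pvStep grid rows cols) init).getD i []).length = (init.getD i []).length := by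
  induction L generalizing init with
  | nil => rfl
  | cons q L ih =>
    rw [List.foldl_cons, ih]
    unfold pvStep
    cases h : pvTgt grid rows cols q
    · rfl
    · exact rowlen_pvSet ..

theorem cellN_foldl_writes (grid : List (List Int)) (rows cols : Int)
    (L : List (Int × Int × Int × Int)) (init : List (List Int)) (i j : Nat)
    (hi : i < init.length) (hj : j < (init.getD i []).length) :
    cellN (L.foldl (pvStep grid rows cols) init) i j =
      if L.any (fun q => pvTgt grid rows cols q == some ((i : Int), (j : Int))) then 1
      else cellN init i j := by
  induction L generalizing init with
  | nil => simp
  | cons q L ih =>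
    rw [List.foldl_cons, List.any_cons]
    cases h : pvTgt grid rows cols q with
    | none =>
      have hstep : pvStep grid rows cols init q = init := by unfold pvStep; rw [h]
      rw [hstep, ih init hi hj]
      rfl
    | some p =>
      have hstep : pvStep grid rows cols init q = pvSet init p.1 p.2 1 := by unfold pvStep; rw [h]
      have hnn := pvTgt_nonneg grid rows cols q p h
      have hi' : i < (pvSet init p.1 p.2 1).length := by simp [pvSet, hi]
      have hj' : j < ((pvSet init p.1 p.2 1).getD i []).length := by rw [rowlen_pvSet]; exact hj
      rw [hstep, ih _ hi' hj', cellN_pvSet init p.1 p.2 1 hnn.1 hnn.2 i j hi hj]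
      by_cases hhit : p.1 = (i : Int) ∧ p.2 = (j : Int)
      · have hb : (some p == some ((i : Int), (j : Int))) = true := by
          simp [Prod.ext_iff, hhit.1, hhit.2]
        rw [hb]
        simp [hhit]
        try rfl
      · have hb : (some p == some ((i : Int), (j : Int))) = false := by
          simp only [beq_eq_false_iff_ne, ne_eq, Option.some.injEq, Prod.ext_iff]; omega
        rw [hb]
        norm_num [hhit]
        try rfl

theorem A_eq_quadsFold (grid : List (List Int)) :
    solve_dc1df850 grid =
      (pvQuads grid grid.length ((PySem.List.pyGet? grid 0).getD []).length).foldl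
        (pvStep grid grid.length ((PySem.List.pyGet? grid 0).getD []).length)
        (grid.map (fun row => row)) := by
  unfold solve_dc1df850 pvQuads
  dsimp only
  rw [List.foldl_flatMap]
  congr 1
  funext out r
  rw [List.foldl_flatMap]
  congr 1
  funext out c
  by_cases h2 : pvCell grid r c = 2
  · rw [if_pos h2, if_pos h2, List.foldl_flatMap]
    congr 1
    funext out dr
    rw [List.foldl_map]
    congr 1
    funext out dc
    unfold pvStep pvTgt
    split <;> rfl
  · rw [if_neg h2, if_neg h2]
    rfl

-- the 3x3-window test of B, lifted out of the let for the proofs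
def pvNear2 (grid : List (List Int)) (rows cols r c : Int) : Bool :=
  (PySem.List.pyRange (max (r - 1) 0) (min (r + 2) rows) 1).any (fun nr =>
    (PySem.List.pyRange (max (c - 1) 0) (min (c + 2) cols) 1).any (fun nc =>
      pvCell grid nr nc == 2))

-- B's per-row condition at column c (row index r fixed)
def pvPull (grid : List (List Int)) (rows cols : Int) (r : Int) (row : List Int) (c : Int) : Bool :=
  ((PySem.List.pyGet? row c).getD 0 == 0) && pvNear2 grid rows cols r c

theorem B_closed (grid : List (List Int)) :
    solve_dc1df850_alt grid =
      (PySem.List.enumerate grid 0).map (fun rrow =>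
        (PySem.List.pyRange 0 ((((PySem.List.pyGet? grid 0).getD []).length : Int)) 1).foldl
          (fun nrow c =>
            if pvPull grid grid.length ((PySem.List.pyGet? grid 0).getD []).length rrow.1 rrow.2 c
            then nrow.set c.toNat 1 else nrow) rrow.2) := by
  rfl

theorem length_foldl_set (P : Int → Bool) (L : List Int) (row : List Int) :
    (L.foldl (fun nrow c => if P c then nrow.set c.toNat (1 : Int) else nrow) row).length
      = row.length := by
  induction L generalizing row with
  | nil => rfl
  | cons c L ih =>
    rw [List.foldl_cons, ih]
    split <;> simp

theorem foldl_set_getD (P : Int → Bool) (L : List Int) (row : List Int) (j : Nat)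
    (hj : j < row.length) (hnn : ∀ c ∈ L, 0 ≤ c) :
    (L.foldl (fun nrow c => if P c then nrow.set c.toNat (1 : Int) else nrow) row).getD j 0 =
      if L.any (fun c => P c && c == (j : Int)) then 1 else row.getD j 0 := by
  induction L generalizing row with
  | nil => simp
  | cons c L ih =>
    rw [List.foldl_cons, List.any_cons]
    have hc0 : 0 ≤ c := hnn c (List.mem_cons_self ..)
    have hnn' : ∀ x ∈ L, 0 ≤ x := fun x hx => hnn x (List.mem_cons_of_mem _ hx)
    by_cases hP : P c = true
    · rw [if_pos hP]
      have hlen : (row.set c.toNat (1 : Int)).length = row.length := by simp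
      rw [ih (row.set c.toNat 1) (by rwa [hlen]) hnn']
      by_cases hcj : c = (j : Int)
      · have hb : (P c && c == (j : Int)) = true := by subst hcj; simp [hP]
        rw [hb]
        have hset : (row.set c.toNat (1 : Int)).getD j 0 = 1 := by
          have hcn : c.toNat = j := by omega
          rw [hcn]
          simp [List.getD_eq_getElem?_getD, List.getElem?_set, hj]
        rw [hset]
        split <;> simp
      · have hb : (P c && c == (j : Int)) = false := by
          simp only [Bool.and_eq_false_iff, beq_eq_false_iff_ne, ne_eq]
          right; exact hcj
        rw [hb]
        have hset : (row.set c.toNat (1 : Int)).getD j 0 = row.getD j 0 := by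
          have hne : c.toNat ≠ j := by omega
          simp [List.getD_eq_getElem?_getD, List.getElem?_set_ne hne]
        rw [hset]
        simp
    · rw [if_neg hP, ih row hj hnn']
      have hb : (P c && c == (j : Int)) = false := by simp [hP]
      rw [hb]
      simp

theorem cond_iff (grid : List (List Int)) (i j : Nat)
    (hi : i < grid.length) (hj : j < grid[i].length) :
    ((pvQuads grid grid.length ((PySem.List.pyGet? grid 0).getD []).length).any
        (fun q => pvTgt grid grid.length ((PySem.List.pyGet? grid 0).getD []).length q
          == some ((i : Int), (j : Int))) = true)
      ↔ ((j : Int) < (((PySem.List.pyGet? grid 0).getD []).length : Int) ∧ grid[i][j] = 0 ∧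
          pvNear2 grid grid.length ((PySem.List.pyGet? grid 0).getD []).length (i : Int) (j : Int) = true) := by
  have hcell : pvCell grid (i : Int) (j : Int) = grid[i][j] := by
    rw [pvCell_natCast, cellN_eq grid i j hi hj]
  simp only [pvQuads, pvNear2, List.any_eq_true, List.mem_flatMap, List.mem_map,
    PySem.List.mem_pyRange_one, List.mem_ite_nil_right, pvTgt, beq_iff_eq,
    Option.ite_none_right_eq_some, Option.some.injEq, Prod.mk.injEq]
  constructor
  · rintro ⟨x, ⟨r, hrb, c, hcb, h2, dr, hdrb, dc, hdcb, hx⟩, hguard, hnr, hnc⟩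
    subst hx
    simp only at hguard hnr hnc
    refine ⟨by omega, ?_, r, ⟨by omega, by omega⟩, c, ⟨by omega, by omega⟩, h2⟩
    have : pvCell grid (r + dr) (c + dc) = 0 := hguard.2.2.2.2
    rwa [hnr, hnc, hcell] at this
  · rintro ⟨hjC, h0, nr, hnrb, nc, hncb, h2⟩
    have e1 : nr + ((i : Int) - nr) = (i : Int) := by ring
    have e2 : nc + ((j : Int) - nc) = (j : Int) := by ring
    refine ⟨(nr, nc, (i : Int) - nr, (j : Int) - nc),
      ⟨nr, ⟨?_, ?_⟩, nc, ⟨?_, ?_⟩, h2,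
        (i : Int) - nr, ⟨?_, ?_⟩, (j : Int) - nc, ⟨?_, ?_⟩, rfl⟩, ?_, ?_, ?_⟩ <;>
      dsimp only <;>
      first
        | omega
        | (rw [e1, e2]; omega)

theorem main_eq (grid : List (List Int)) (hpre : Pre_solve_dc1df850 grid) :
    solve_dc1df850 grid = solve_dc1df850_alt grid := by
  obtain ⟨hne, hlong⟩ := hpre
  have h0 : 0 < grid.length := by
    cases grid with
    | nil => exact absurd rfl hne
    | cons a l => simp
  have hg0 : (PySem.List.pyGet? grid (0 : Int)).getD [] = grid.headD [] := by
    have := PySem.List.pyGet?_natCast grid 0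
    simp only [Nat.cast_zero] at this
    rw [this, List.getElem?_eq_getElem h0]
    cases grid with
    | nil => exact absurd rfl hne
    | cons a l => rfl
  have hcols : ∀ (i : Nat) (hi : i < grid.length),
      ((PySem.List.pyGet? grid 0).getD []).length ≤ grid[i].length := by
    intro i hi
    rw [hg0]
    exact hlong grid[i] (List.getElem_mem hi)
  have hmapid : grid.map (fun row => row) = grid := by simp
  have hA := A_eq_quadsFold grid
  rw [hmapid] at hA
  rw [B_closed]
  have hAlen : (solve_dc1df850 grid).length = grid.length := by
    rw [hA, length_foldl_writes]
  apply List.ext_getElem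
  · rw [hAlen]
    simp [PySem.List.length_enumerate]
  intro i hiA hiB
  have hi : i < grid.length := by rwa [hAlen] at hiA
  have hiE : i < (PySem.List.enumerate grid 0).length := by
    rwa [PySem.List.length_enumerate]
  have hBrow : ((PySem.List.enumerate grid 0).map (fun rrow =>
        (PySem.List.pyRange 0 ((((PySem.List.pyGet? grid 0).getD []).length : Int)) 1).foldl
          (fun nrow c =>
            if pvPull grid grid.length ((PySem.List.pyGet? grid 0).getD []).length rrow.1 rrow.2 c
            then nrow.set c.toNat 1 else nrow) rrow.2))[i] =
      (PySem.List.pyRange 0 ((((PySem.List.pyGet? grid 0).getD []).length : Int)) 1).foldl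
          (fun nrow c =>
            if pvPull grid grid.length ((PySem.List.pyGet? grid 0).getD []).length ((0 : Int) + i) grid[i] c
            then nrow.set c.toNat 1 else nrow) grid[i] := by
    rw [List.getElem_map, PySem.List.getElem_enumerate grid 0 i hiE]
  rw [hBrow]
  have hrowA : (solve_dc1df850 grid)[i].length = grid[i].length := by
    rw [← List.getD_eq_getElem (solve_dc1df850 grid) [] hiA, hA, rowlen_foldl_writes,
      List.getD_eq_getElem grid [] hi]
  apply List.ext_getElem
  · rw [hrowA, length_foldl_set]
  intro j hjA hjB
  have hj : j < grid[i].length := by rwa [hrowA] at hjA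
  have hjD : j < (grid.getD i []).length := by
    rwa [List.getD_eq_getElem grid [] hi]
  have hcellA : (solve_dc1df850 grid)[i][j] = cellN (solve_dc1df850 grid) i j :=
    (cellN_eq _ i j hiA hjA).symm
  have hnn : ∀ c ∈ PySem.List.pyRange 0 ((((PySem.List.pyGet? grid 0).getD []).length : Int)) 1,
      0 ≤ c := by
    intro c hc
    exact ((PySem.List.mem_pyRange_one ..).mp hc).1
  have hBentry :
      ((PySem.List.pyRange 0 ((((PySem.List.pyGet? grid 0).getD []).length : Int)) 1).foldl
          (fun nrow c =>
            if pvPull grid grid.length ((PySem.List.pyGet? grid 0).getD []).length ((0 : Int) + i) grid[i] c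
            then nrow.set c.toNat 1 else nrow) grid[i])[j] =
      if (PySem.List.pyRange 0 ((((PySem.List.pyGet? grid 0).getD []).length : Int)) 1).any
          (fun c => pvPull grid grid.length ((PySem.List.pyGet? grid 0).getD []).length ((0 : Int) + i) grid[i] c
            && c == (j : Int)) then 1 else grid[i][j] := by
    rw [← List.getD_eq_getElem _ 0 hjB, foldl_set_getD _ _ _ j hj hnn,
      List.getD_eq_getElem grid[i] 0 hj]
  rw [hcellA, hA, cellN_foldl_writes grid _ _ _ grid i j hi hjD, hBentry,
    cellN_eq grid i j hi hj]
  have hcond := cond_iff grid i j hi hj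
  have hBcond : ((PySem.List.pyRange 0 ((((PySem.List.pyGet? grid 0).getD []).length : Int)) 1).any
          (fun c => pvPull grid grid.length ((PySem.List.pyGet? grid 0).getD []).length ((0 : Int) + i) grid[i] c
            && c == (j : Int)) = true)
      ↔ ((j : Int) < (((PySem.List.pyGet? grid 0).getD []).length : Int) ∧ grid[i][j] = 0 ∧
          pvNear2 grid grid.length ((PySem.List.pyGet? grid 0).getD []).length (i : Int) (j : Int) = true) := by
    have hrowget : (PySem.List.pyGet? grid[i] ((j : Nat) : Int)).getD 0 = grid[i][j] := by
      rw [PySem.List.pyGet?_natCast, List.getElem?_eq_getElem hj]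
      rfl
    simp only [List.any_eq_true, PySem.List.mem_pyRange_one, Bool.and_eq_true, beq_iff_eq,
      pvPull, zero_add]
    constructor
    · rintro ⟨c, ⟨hc0, hcU⟩, ⟨hz, hn⟩, hcj⟩
      subst hcj
      rw [hrowget] at hz
      exact ⟨hcU, by exact_mod_cast hz, hn⟩
    · rintro ⟨hjU, hz, hn⟩
      refine ⟨(j : Int), ⟨by omega, hjU⟩, ⟨?_, hn⟩, rfl⟩
      rw [hrowget]
      simp [hz]
  by_cases hc : ((j : Int) < (((PySem.List.pyGet? grid 0).getD []).length : Int) ∧ grid[i][j] = 0 ∧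
      pvNear2 grid grid.length ((PySem.List.pyGet? grid 0).getD []).length (i : Int) (j : Int) = true)
  · rw [if_pos (hcond.mpr hc), if_pos (hBcond.mpr hc)]
  · rw [if_neg (fun h => hc (hcond.mp h)),
      if_neg (fun h => hc (hBcond.mp h))]

-- ===== VERDICT (by name: the statement is the Claim_ definition above) =====
theorem solve_dc1df850_spec : Claim_equal_solve_dc1df850 := by
  intro grid _ hpre
  unfold Spec_solve_dc1df850
  exact main_eq grid hpre
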